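-- pv_equiv track=rewrite | github.com/melFranklin-76/Dontpullup | compare_code_files.py | build_conflict_groups
-- ===== SOURCE A (Python) =====
-- from collections import defaultdict
-- from typing import Dict, List, Tuple
--
-- def build_conflict_groups(records):
--     """Group by relative path -> list of (location, abs_path, sha) where >1 unique sha."""
--     by_path: Dict[str, List[Tuple[str, str, str]]] = defaultdict(list)
--     for rel_path, loc, abs_path, sha in records:
--         by_path[rel_path].append((loc, abs_path, sha))
--     # Keep only paths with differing hashes
--     conflicts = {}
--     for rel_path, items in by_path.items():
--         unique_hashes = {sha for _, _, sha in items}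
--         if len(unique_hashes) > 1:
--             conflicts[rel_path] = items
--     return conflicts
-- ===== SOURCE B (Python) =====
-- def build_conflict_groups(records):
--     """Group by relative path -> list of (location, abs_path, sha) where >1 unique sha."""
--     conflicts = {}
--     for path in dict.fromkeys(r[0] for r in records):
--         items = [(loc, abs_path, sha) for rel_path, loc, abs_path, sha in records if rel_path == path]
--         if len({sha for _, _, sha in items}) > 1:
--             conflicts[path] = items
--     return conflicts
-- ===== Notes on version B (the rewrite author's own statement) =====
-- stated objective: alternative
-- what changed: Replaces the defaultdict bucketing pass plus second filtering pass with a single loop over the distinct paths (dict.fromkeys, first-occurrence order) that rebuilds each path's group by filtering the records directly.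
import Mathlib
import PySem

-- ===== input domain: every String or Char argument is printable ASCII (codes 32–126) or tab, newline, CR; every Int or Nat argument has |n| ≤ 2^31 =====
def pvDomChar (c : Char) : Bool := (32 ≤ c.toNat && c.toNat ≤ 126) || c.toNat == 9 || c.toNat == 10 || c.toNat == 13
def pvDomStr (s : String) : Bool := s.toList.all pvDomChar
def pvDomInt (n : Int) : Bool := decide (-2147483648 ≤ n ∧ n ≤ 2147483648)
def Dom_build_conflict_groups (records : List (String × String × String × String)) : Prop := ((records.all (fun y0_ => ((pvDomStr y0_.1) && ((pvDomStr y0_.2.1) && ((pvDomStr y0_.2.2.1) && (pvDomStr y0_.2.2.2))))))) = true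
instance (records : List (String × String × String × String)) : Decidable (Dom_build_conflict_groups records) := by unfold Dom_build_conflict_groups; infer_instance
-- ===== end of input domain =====

-- B replaces A's bucket-dict-then-filter with a nested scan over the distinct paths (dict.fromkeys order),
-- rebuilding each group by filtering the records; objective: alternative (no speed claim).

-- ===== PORT A =====
-- A: defaultdict(list) bucketing pass, then a second pass keeping paths with >1 distinct sha.
def build_conflict_groups (records : List (String × String × String × String)) : List (String × List (String × String × String)) :=
  let by_path : PySem.Dict String (List (String × String × String)) :=
    records.foldl (fun d r => d.modify r.1 [] (fun xs => xs ++ [(r.2.1, r.2.2.1, r.2.2.2)])) PySem.Dict.empty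
  let conflicts : PySem.Dict String (List (String × String × String)) :=
    by_path.items.foldl (fun c pi =>
      if PySem.Set.len (PySem.Set.ofList (pi.2.map (fun it => it.2.2))) > 1
      then c.insert pi.1 pi.2 else c) PySem.Dict.empty
  conflicts.items

-- ===== PORT B =====
-- the list comprehension '[(loc, abs_path, sha) for rel_path, loc, abs_path, sha in records if rel_path == path]'
def bcg_group (records : List (String × String × String × String)) (path : String) : List (String × String × String) :=
  (records.filter (fun r => r.1 == path)).map (fun r => (r.2.1, r.2.2.1, r.2.2.2))

-- B: for each distinct path in first-occurrence order (dict.fromkeys = PySem.List.dedup), rebuild its group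
-- by scanning records, and insert it into the result dict when it carries more than one distinct sha.
def build_conflict_groups_alt (records : List (String × String × String × String)) : List (String × List (String × String × String)) :=
  let conflicts : PySem.Dict String (List (String × String × String)) :=
    (PySem.List.dedup (records.map (fun r => r.1))).foldl (fun c path =>
      let items := bcg_group records path
      if PySem.Set.len (PySem.Set.ofList (items.map (fun it => it.2.2))) > 1
      then c.insert path items else c) PySem.Dict.empty
  conflicts.items

-- ===== PRECONDITION & SPEC =====
def Spec_build_conflict_groups (records : List (String × String × String × String)) (out : List (String × List (String × String × String))) : Prop := out = build_conflict_groups_alt records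
instance (records : List (String × String × String × String)) (out : List (String × List (String × String × String))) : Decidable (Spec_build_conflict_groups records out) := by unfold Spec_build_conflict_groups; infer_instance

-- ===== CLAIM (what is proved, stated in full; the proofs are below) =====
def Claim_equal_build_conflict_groups : Prop := ∀ (records : List (String × String × String × String)), Dom_build_conflict_groups records → Spec_build_conflict_groups records (build_conflict_groups records)

-- ===== LEMMAS AND PROOFS =====

-- A's bucket dict, as an association list, IS: the distinct paths in first-occurrence order, each paired
-- with its filtered group (B's per-path scan).
theorem bcg_by_path_items (records : List (String × String × String × String)) :
    (records.foldl (fun d r => d.modify r.1 [] (fun xs => xs ++ [(r.2.1, r.2.2.1, r.2.2.2)]))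
        (PySem.Dict.empty : PySem.Dict String (List (String × String × String)))).items
      = (PySem.List.dedup (records.map (fun r => r.1))).map
          (fun p => (p, bcg_group records p)) := by
  set step := fun (d : PySem.Dict String (List (String × String × String))) (r : String × String × String × String) =>
      d.modify r.1 [] (fun xs => xs ++ [(r.2.1, r.2.2.1, r.2.2.2)]) with hstep
  have hnd : (records.foldl step PySem.Dict.empty).keys.Nodup := by
    rw [hstep]
    exact PySem.Dict.nodup_keys_foldl_modify_key records (fun r => r.1) []
      (fun _ r => fun xs => xs ++ [(r.2.1, r.2.2.1, r.2.2.2)]) _ PySem.Dict.nodup_keys_empty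
  have hkeys : (records.foldl step PySem.Dict.empty).keys
      = PySem.List.dedup (records.map (fun r => r.1)) := by
    rw [hstep]
    rw [PySem.Dict.keys_foldl_modify_key records (fun r => r.1) []
      (fun _ r => fun xs => xs ++ [(r.2.1, r.2.2.1, r.2.2.2)]) PySem.Dict.empty]
    rfl
  have hget : ∀ p, (records.foldl step PySem.Dict.empty).getD p [] = bcg_group records p := by
    intro p
    have hfm : records.foldl step PySem.Dict.empty
        = (records.map (fun r => (r.1, (r.2.1, r.2.2.1, r.2.2.2)))).foldl
            (fun d q => d.modify q.1 [] (fun xs => xs ++ [q.2])) PySem.Dict.empty := by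
      rw [List.foldl_map]
    rw [hfm, PySem.Dict.getD_foldl_modify_append]
    simp only [PySem.Dict.getD_empty, List.nil_append, List.filter_map, List.map_map, bcg_group]
    rfl
  rw [PySem.Dict.items_eq_map_keys _ hnd ([] : List (String × String × String)), hkeys]
  exact List.map_congr_left (fun p _ => by rw [hget p])

-- ===== VERDICT (by name: the statement is the Claim_ definition above) =====
theorem build_conflict_groups_spec : Claim_equal_build_conflict_groups := by
  intro records _
  show build_conflict_groups records = build_conflict_groups_alt records
  simp only [build_conflict_groups, build_conflict_groups_alt]
  rw [bcg_by_path_items, List.foldl_map]
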